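-- pv_equiv track=rewrite | github.com/AndreiMoraru123/aoc | d2/solution.py | process_game_line
-- ===== SOURCE A (Python) =====
-- import operator
-- from typing import Dict, Tuple
-- from functools import reduce
--
-- rules: Dict[str, int] = {
--     'blue': 14,
--     'green': 13,
--     'red': 12,
-- }
--
-- def build_number(sequence: str) -> str:
--     return ''.join([char for char in sequence if char.isnumeric()])
--
-- def validate(color: str, draw: str) -> bool:
--     if color in draw:
--         complete_number = build_number(draw)
--         return int(complete_number) <= rules[color]
--     return True
--
-- def process_game_line(line: str) -> Tuple[str, bool, int]:
--     game_id, cubes_info = line.strip().split(':')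
--     nr = build_number(game_id)
--     min_cubes = {color: 0 for color in rules}
--     sets = cubes_info.split(';')
--
--     for s in sets:
--         for draw in s.split(','):
--             for color in rules:
--                 if color in draw:
--                     num_cubes = int(build_number(draw))
--                     min_cubes[color] = max(min_cubes[color], num_cubes)
--     power = reduce(operator.mul, (min_cubes[color] for color in rules))
--     is_valid_game = all(validate(color, draw) for s in sets for color in rules for draw in s.split(','))
--     return nr, is_valid_game, power
-- ===== SOURCE B (Python) =====
-- def process_game_line(line):
--     game_id, cubes_info = line.strip().split(':')
--     nr = ''.join(c for c in game_id if c.isnumeric())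
--     draws = [draw for s in cubes_info.split(';') for draw in s.split(',')]
--     blue = green = red = 0
--     for draw in draws:
--         if 'blue' in draw or 'green' in draw or 'red' in draw:
--             n = int(''.join(c for c in draw if c.isnumeric()))
--             if 'blue' in draw and n > blue:
--                 blue = n
--             if 'green' in draw and n > green:
--                 green = n
--             if 'red' in draw and n > red:
--                 red = n
--     return nr, blue <= 14 and green <= 13 and red <= 12, blue * green * red
-- ===== Notes on version B (the rewrite author's own statement) =====
-- stated objective: simpler
-- what changed: B flattens the draws once, keeps three scalar maxima in a single pass (no dict, no max() helper), and derives validity directly from the maxima, deleting the validate helper and the whole second all(...) pass over sets x colors x draws.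
import Mathlib
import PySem

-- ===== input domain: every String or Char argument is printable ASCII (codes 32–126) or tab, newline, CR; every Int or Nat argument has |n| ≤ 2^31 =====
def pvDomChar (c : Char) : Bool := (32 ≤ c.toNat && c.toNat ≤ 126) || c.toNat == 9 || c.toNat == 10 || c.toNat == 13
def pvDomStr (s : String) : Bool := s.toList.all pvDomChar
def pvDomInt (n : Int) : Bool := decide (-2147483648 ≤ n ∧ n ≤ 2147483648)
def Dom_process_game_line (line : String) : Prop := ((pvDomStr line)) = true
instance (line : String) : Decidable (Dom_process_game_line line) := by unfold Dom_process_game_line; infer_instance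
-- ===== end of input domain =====

-- B flattens the draws once, keeps three scalar maxima in one pass, and derives validity from those maxima,
-- dropping A's validate helper and its whole second pass over sets × colors × draws (objective: simpler).

-- s.split(sep) for a nonempty separator (both Pythons split with the literal ':', ';', ',')
def pglSplit (s : String) (sep : String) : List String :=
  (PySem.Chars.splitOn s.toList sep.toList).map String.ofList

-- ===== PORT A =====
-- rules: Dict[str, int] (insertion order blue, green, red)
def pglRules : PySem.Dict String Int := PySem.Dict.mk [("blue", 14), ("green", 13), ("red", 12)]

-- build_number: ''.join(c for c in sequence if c.isnumeric()); isnumeric = isdigit on the printable-ASCII domain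
def build_number (sequence : String) : String :=
  String.ofList (sequence.toList.filter (fun c => PySem.Chars.isdigit c))

-- validate(color, draw); int('') would raise ValueError — Pre_ excludes that, the port defaults the Option there
def pglValidate (color : String) (draw : String) : Bool :=
  if PySem.Str.isIn color draw then
    decide (((PySem.Int.ofStr? (build_number draw)).getD 0) ≤ (pglRules.get? color).getD 0)
  else true

def process_game_line (line : String) : String × Bool × Int :=
  match pglSplit (PySem.Str.strip line) ":" with
  | [game_id, cubes_info] =>
      let nr := build_number game_id
      let min_cubes : PySem.Dict String Int := PySem.Dict.mk [("blue", 0), ("green", 0), ("red", 0)]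
      let sets := pglSplit cubes_info ";"
      let min_cubes := sets.foldl (fun d s =>
        (pglSplit s ",").foldl (fun d draw =>
          pglRules.keys.foldl (fun d color =>
            if PySem.Str.isIn color draw then
              d.insert color (max (d.getD color 0) ((PySem.Int.ofStr? (build_number draw)).getD 0))
            else d) d) d) min_cubes
      -- reduce(operator.mul, …) over the three per-color values (nonempty; the [] arm is unreachable)
      let power : Int := match pglRules.keys.map (fun color => min_cubes.getD color 0) with
        | [] => 0
        | v :: vs => vs.foldl (· * ·) v
      let is_valid_game := sets.all (fun s => pglRules.keys.all (fun color =>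
        (pglSplit s ",").all (fun draw => pglValidate color draw)))
      (nr, is_valid_game, power)
  | _ => ("", false, 0)   -- unpacking 'game_id, cubes_info = …' raises ValueError here; excluded by Pre_

-- ===== PORT B =====
-- ''.join(c for c in s if c.isnumeric()); isnumeric = isdigit on the printable-ASCII domain
def pglDigits (s : String) : String :=
  String.ofList (s.toList.filter (fun c => PySem.Chars.isdigit c))

-- one loop iteration of B: update the three running maxima from one draw
def pglStep (acc : Int × Int × Int) (draw : String) : Int × Int × Int :=
  if PySem.Str.isIn "blue" draw || PySem.Str.isIn "green" draw || PySem.Str.isIn "red" draw then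
    let n := (PySem.Int.ofStr? (pglDigits draw)).getD 0   -- int('') raises ValueError; excluded by Pre_
    (if PySem.Str.isIn "blue" draw && decide (n > acc.1) then n else acc.1,
     if PySem.Str.isIn "green" draw && decide (n > acc.2.1) then n else acc.2.1,
     if PySem.Str.isIn "red" draw && decide (n > acc.2.2) then n else acc.2.2)
  else acc

def process_game_line_alt (line : String) : String × Bool × Int :=
  let parts := pglSplit (PySem.Str.strip line) ":"
  if parts.length = 2 then   -- 'game_id, cubes_info = …' unpack; raises ValueError otherwise (excluded by Pre_)
    let game_id := parts.getD 0 ""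
    let cubes_info := parts.getD 1 ""
    let nr := pglDigits game_id
    let draws := (pglSplit cubes_info ";").flatMap (fun s => pglSplit s ",")
    let m := draws.foldl pglStep (0, 0, 0)
    (nr, decide (m.1 ≤ 14) && decide (m.2.1 ≤ 13) && decide (m.2.2 ≤ 12), m.1 * m.2.1 * m.2.2)
  else ("", false, 0)

-- ===== PRECONDITION & SPEC =====
-- Pre_ excludes exactly the inputs on which A raises: a line whose strip().split(':') does not have
-- exactly two parts (ValueError on unpacking), and a draw that mentions a color but contains no digit
-- (int('') raises ValueError).
def Pre_process_game_line (line : String) : Prop :=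
  (pglSplit (PySem.Str.strip line) ":").length = 2 ∧
  ∀ s ∈ pglSplit ((pglSplit (PySem.Str.strip line) ":").getD 1 "") ";", ∀ d ∈ pglSplit s ",",
    (PySem.Str.isIn "blue" d || PySem.Str.isIn "green" d || PySem.Str.isIn "red" d) = true →
    d.toList.filter (fun c => PySem.Chars.isdigit c) ≠ []

instance (line : String) : Decidable (Pre_process_game_line line) := by
  unfold Pre_process_game_line; infer_instance

def pvWitness_process_game_line : String := "Game 12: 3 blue, 4 red; 1 red, 2 green"

def Spec_process_game_line (line : String) (out : String × Bool × Int) : Prop := out = process_game_line_alt line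
instance (line : String) (out : String × Bool × Int) : Decidable (Spec_process_game_line line out) := by unfold Spec_process_game_line; infer_instance

-- ===== CLAIM (what is proved, stated in full; the proofs are below) =====
def Claim_equal_process_game_line : Prop := ∀ (line : String), Dom_process_game_line line → Pre_process_game_line line → Spec_process_game_line line (process_game_line line)

-- ===== LEMMAS AND PROOFS =====

-- the number both programs parse out of a draw
def pglNum (d : String) : Int := (PySem.Int.ofStr? (pglDigits d)).getD 0

-- A's inner per-color loop body, folded over pglRules.keys
def pglStepA (d : PySem.Dict String Int) (draw : String) : PySem.Dict String Int :=
  pglRules.keys.foldl (fun d color =>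
    if PySem.Str.isIn color draw then
      d.insert color (max (d.getD color 0) ((PySem.Int.ofStr? (build_number draw)).getD 0))
    else d) d

-- one-step correspondence between A's dict update and B's triple update
theorem pglStepA_eq (b g r : Int) (draw : String) :
    pglStepA (PySem.Dict.mk [("blue", b), ("green", g), ("red", r)]) draw =
      PySem.Dict.mk [("blue", (pglStep (b, g, r) draw).1),
                     ("green", (pglStep (b, g, r) draw).2.1),
                     ("red", (pglStep (b, g, r) draw).2.2)] := by
  have hkeys : pglRules.keys = ["blue", "green", "red"] := rfl
  have hbn : build_number draw = pglDigits draw := rfl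
  unfold pglStepA pglStep
  rw [hkeys]
  cases hb : PySem.Str.isIn "blue" draw <;>
  cases hg : PySem.Str.isIn "green" draw <;>
  cases hr : PySem.Str.isIn "red" draw <;>
    simp only [List.foldl_cons, List.foldl_nil, hb, hg, hr, hbn] <;>
    simp [PySem.Dict.insert, PySem.Dict.getD, PySem.Dict.get?, PySem.Dict.contains,
      max_def] <;>
    split_ifs <;> simp_all <;> omega

-- the whole maxima fold, dict side vs triple side
theorem pglFold_eq (draws : List String) (b g r : Int) :
    draws.foldl pglStepA (PySem.Dict.mk [("blue", b), ("green", g), ("red", r)]) =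
      PySem.Dict.mk [("blue", (draws.foldl pglStep (b, g, r)).1),
                     ("green", (draws.foldl pglStep (b, g, r)).2.1),
                     ("red", (draws.foldl pglStep (b, g, r)).2.2)] := by
  induction draws generalizing b g r with
  | nil => rfl
  | cons d t ih =>
      simp only [List.foldl_cons, pglStepA_eq]
      exact ih _ _ _

-- per-color scalar update B performs
def pglUpd (c : String) (a : Int) (d : String) : Int :=
  if PySem.Str.isIn c d && decide (pglNum d > a) then pglNum d else a

theorem pglStep_proj (s : Int × Int × Int) (d : String) :
    pglStep s d = (pglUpd "blue" s.1 d, pglUpd "green" s.2.1 d, pglUpd "red" s.2.2 d) := by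
  unfold pglStep pglUpd pglNum
  cases hb : PySem.Str.isIn "blue" d <;>
  cases hg : PySem.Str.isIn "green" d <;>
  cases hr : PySem.Str.isIn "red" d <;>
    simp

theorem pglFold_proj (draws : List String) (s : Int × Int × Int) :
    draws.foldl pglStep s =
      (draws.foldl (pglUpd "blue") s.1, draws.foldl (pglUpd "green") s.2.1,
       draws.foldl (pglUpd "red") s.2.2) := by
  induction draws generalizing s with
  | nil => rfl
  | cons d t ih => simp only [List.foldl_cons, pglStep_proj]; exact ih _

-- the running maximum stays ≤ L iff the start and every contributing draw are ≤ L
theorem pglFold_upd_le (c : String) (L : Int) (draws : List String) (a : Int) :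
    (draws.foldl (pglUpd c) a ≤ L) ↔
      (a ≤ L ∧ ∀ d ∈ draws, PySem.Str.isIn c d = true → pglNum d ≤ L) := by
  induction draws generalizing a with
  | nil => simp
  | cons d t ih =>
      simp only [List.foldl_cons, ih, List.mem_cons, forall_eq_or_imp]
      unfold pglUpd
      cases hc : PySem.Str.isIn c d
      · simp only [Bool.false_and, Bool.false_eq_true, if_false, Bool.false_eq_true,
          false_implies, true_and]
      · simp only [Bool.true_and, decide_eq_true_eq, forall_const]
        by_cases hn : pglNum d > a
        · rw [if_pos hn]
          exact ⟨fun ⟨h1, h2⟩ => ⟨by omega, h1, h2⟩, fun ⟨_, h1, h2⟩ => ⟨h1, h2⟩⟩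
        · rw [if_neg hn]
          exact ⟨fun ⟨h1, h2⟩ => ⟨h1, by omega, h2⟩, fun ⟨h1, _, h2⟩ => ⟨h1, h2⟩⟩

-- validate c d holds iff: when the color occurs, the parsed number obeys the limit
theorem pglValidate_iff (c : String) (d : String) :
    pglValidate c d = true ↔ (PySem.Str.isIn c d = true → pglNum d ≤ (pglRules.get? c).getD 0) := by
  unfold pglValidate pglNum
  have hbn : build_number d = pglDigits d := rfl
  cases hc : PySem.Str.isIn c d <;> simp [hbn]

-- A's second pass equals B's bound check on the maxima
set_option maxHeartbeats 1000000 in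
theorem pglValid_eq (sets : List String) :
    (sets.all (fun s => pglRules.keys.all (fun color =>
        (pglSplit s ",").all (fun draw => pglValidate color draw)))) =
      (decide (((sets.flatMap (fun s => pglSplit s ",")).foldl pglStep (0, 0, 0)).1 ≤ 14) &&
       decide (((sets.flatMap (fun s => pglSplit s ",")).foldl pglStep (0, 0, 0)).2.1 ≤ 13) &&
       decide (((sets.flatMap (fun s => pglSplit s ",")).foldl pglStep (0, 0, 0)).2.2 ≤ 12)) := by
  have hkeys : pglRules.keys = ["blue", "green", "red"] := rfl
  have e1 : (pglRules.get? "blue").getD 0 = (14 : Int) := rfl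
  have e2 : (pglRules.get? "green").getD 0 = (13 : Int) := rfl
  have e3 : (pglRules.get? "red").getD 0 = (12 : Int) := rfl
  rw [Bool.eq_iff_iff, hkeys]
  have hA : (sets.all (fun s => (["blue", "green", "red"] : List String).all (fun color =>
        (pglSplit s ",").all (fun draw => pglValidate color draw)))) = true ↔
      ((∀ d ∈ sets.flatMap (fun s => pglSplit s ","), PySem.Str.isIn "blue" d = true → pglNum d ≤ 14) ∧
       (∀ d ∈ sets.flatMap (fun s => pglSplit s ","), PySem.Str.isIn "green" d = true → pglNum d ≤ 13) ∧
       (∀ d ∈ sets.flatMap (fun s => pglSplit s ","), PySem.Str.isIn "red" d = true → pglNum d ≤ 12)) := by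
    simp only [List.all_eq_true, List.mem_cons, List.not_mem_nil, or_false, forall_eq_or_imp,
      forall_eq, pglValidate_iff, e1, e2, e3]
    constructor
    · intro h
      refine ⟨?_, ?_, ?_⟩ <;>
      · intro d hd hc
        obtain ⟨s, hs, hd⟩ := List.mem_flatMap.mp hd
        first
          | exact (h s hs).1 d hd hc
          | exact (h s hs).2.1 d hd hc
          | exact (h s hs).2.2 d hd hc
    · intro h s hs
      refine ⟨?_, ?_, ?_⟩ <;> intro d hd hc
      · exact h.1 d (List.mem_flatMap.mpr ⟨s, hs, hd⟩) hc
      · exact h.2.1 d (List.mem_flatMap.mpr ⟨s, hs, hd⟩) hc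
      · exact h.2.2 d (List.mem_flatMap.mpr ⟨s, hs, hd⟩) hc
  rw [hA]
  rw [pglFold_proj]
  simp only [Bool.and_eq_true, decide_eq_true_eq]
  constructor
  · rintro ⟨g1, g2, g3⟩
    exact ⟨⟨(pglFold_upd_le _ _ _ _).mpr ⟨by norm_num, g1⟩,
            (pglFold_upd_le _ _ _ _).mpr ⟨by norm_num, g2⟩⟩,
           (pglFold_upd_le _ _ _ _).mpr ⟨by norm_num, g3⟩⟩
  · rintro ⟨⟨h1, h2⟩, h3⟩
    exact ⟨((pglFold_upd_le _ _ _ _).mp h1).2,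
           ((pglFold_upd_le _ _ _ _).mp h2).2,
           ((pglFold_upd_le _ _ _ _).mp h3).2⟩

-- ===== VERDICT (by name: the statement is the Claim_ definition above) =====
theorem process_game_line_spec : Claim_equal_process_game_line := by
  intro line _ hpre
  unfold Spec_process_game_line process_game_line process_game_line_alt
  unfold Pre_process_game_line at hpre
  obtain ⟨gid, ci, hsp⟩ := List.length_eq_two.mp hpre.1
  simp only [hsp]
  -- the two pieces: the maxima dict vs the triple, and the validity passes
  have hflat : (pglSplit ci ";").foldl (fun d s => (pglSplit s ",").foldl pglStepA d)
        (PySem.Dict.mk [("blue", 0), ("green", 0), ("red", 0)]) =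
      ((pglSplit ci ";").flatMap (fun s => pglSplit s ",")).foldl pglStepA
        (PySem.Dict.mk [("blue", 0), ("green", 0), ("red", 0)]) :=
    List.foldl_flatMap.symm
  have hfold := pglFold_eq ((pglSplit ci ";").flatMap (fun s => pglSplit s ",")) 0 0 0
  have hvalid := pglValid_eq (pglSplit ci ";")
  show (build_number gid, _, _) = (pglDigits gid, _, _)
  rw [show (fun (d : PySem.Dict String Int) (draw : String) =>
        pglRules.keys.foldl (fun d color =>
          if PySem.Str.isIn color draw then
            d.insert color (max (d.getD color 0) ((PySem.Int.ofStr? (build_number draw)).getD 0))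
          else d) d) = pglStepA from rfl]
  rw [hflat, hfold, hvalid]
  rfl
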